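-- pv_equiv track=rewrite | github.com/n6s/BitcoinTreasureTools | mnemonic_toolkit.py | reconstruct_mnemonic_from_prefixes
-- ===== SOURCE A (Python) =====
-- from typing import List
--
-- def reconstruct_mnemonic_from_prefixes(words: List[str], wordlist: List[str]) -> str:
--     """
--     Reconstructs BIP-39 mnemonic from a list of prefixes or words using BIP-39 rules.
--
--     Args:
--         words (List[str]): List of potential BIP-39 prefixes or words.
--         wordlist (List[str]): The BIP-39 wordlist for matching.
--
--     Returns:
--         str: Space-separated mnemonic string.
--     """
--     full_words = []
--
--     for word in words:
--         prefix = get_prefix(word)  # Get the 3-letter whole word or 4-letter prefix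
--         if prefix:
--             if len(word) == 3:
--                 # 3-letter words must match exactly
--                 if prefix in wordlist:
--                     full_words.append(prefix)
--             else:
--                 # 4+ letter prefixes must match as the start of a word
--                 matches = [bip39_word for bip39_word in wordlist if bip39_word.startswith(prefix)]
--                 if len(matches) == 1:
--                     full_words.append(matches[0])  # Append the unique match
--
--     # Return the reconstructed mnemonic as a space-separated string
--     return " ".join(full_words)
--
-- def get_prefix(word):
--     """Returns the first 4 characters of a word if it meets the minimum length requirement.
--        Returns the full word if it is exactly 3 letters.
--        Returns None for words shorter than 3 letters."""
--     if len(word) == 3: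
--         return word.lower()  # Return 3-letter word as is
--     elif len(word) >= 4:
--         return word[:4].lower()  # Return first `length` characters
--     return None  # Ignore 1-2 letter words
-- ===== SOURCE B (Python) =====
-- from typing import List
--
-- def reconstruct_mnemonic_from_prefixes(words: List[str], wordlist: List[str]) -> str:
--     """One preprocessing pass groups wordlist entries by their first 4 characters,
--     so each 4+-letter prefix is resolved by a single dict lookup instead of a
--     linear scan over the wordlist."""
--     index = {}
--     for w in wordlist:
--         if len(w) >= 4:
--             index.setdefault(w[:4], []).append(w)
--     full_words = []
--     for word in words:
--         if len(word) == 3: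
--             p = word.lower()
--             if p in wordlist:
--                 full_words.append(p)
--         elif len(word) >= 4:
--             p = word[:4].lower()
--             matches = index.get(p, [])
--             if len(matches) == 1:
--                 full_words.append(matches[0])
--     return " ".join(full_words)
-- ===== Notes on version B (the rewrite author's own statement) =====
-- stated objective: faster
-- what changed: Replaces the per-word linear scan of the wordlist for 4+-letter prefixes by a dictionary from first-4-characters to the list of matching wordlist entries, built in one preprocessing pass, so each prefix is resolved by a single lookup.
import Mathlib
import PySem

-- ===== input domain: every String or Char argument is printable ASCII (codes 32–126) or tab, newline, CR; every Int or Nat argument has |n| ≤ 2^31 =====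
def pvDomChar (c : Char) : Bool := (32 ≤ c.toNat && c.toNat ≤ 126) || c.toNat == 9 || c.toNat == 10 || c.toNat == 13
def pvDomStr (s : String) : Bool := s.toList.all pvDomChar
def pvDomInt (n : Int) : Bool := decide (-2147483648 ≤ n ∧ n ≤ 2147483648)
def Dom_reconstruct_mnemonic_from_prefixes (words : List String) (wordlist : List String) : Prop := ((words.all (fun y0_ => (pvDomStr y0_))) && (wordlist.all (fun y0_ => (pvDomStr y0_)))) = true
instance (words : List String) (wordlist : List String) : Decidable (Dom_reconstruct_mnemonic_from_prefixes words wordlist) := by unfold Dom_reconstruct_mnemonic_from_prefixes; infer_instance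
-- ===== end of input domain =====

-- B replaces the per-word linear scan over the wordlist (for 4+-letter prefixes) by a
-- pfx → mtchs dictionary built in one preprocessing pass (objective: faster).

-- ===== PORT A =====
def get_prefix (word : String) : Option String :=
  if PySem.Str.len word = 3 then some (PySem.Str.lower word)
  else if 4 ≤ PySem.Str.len word then some (PySem.Str.lower (PySem.Str.slice word none (some 4)))
  else none

def reconstruct_mnemonic_from_prefixes (words : List String) (wordlist : List String) : String :=
  let full_words := words.foldl (fun full_words word =>
    match get_prefix word with
    | none => full_words
    | some pfx =>
      if pfx ≠ "" then  -- Python truthiness 'if pfx:' (a non-None pfx may in principle be empty)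
        if PySem.Str.len word = 3 then
          if wordlist.contains pfx then full_words ++ [pfx] else full_words
        else
          let mtchs := wordlist.filter (fun bip39_word => PySem.Str.startswith bip39_word pfx)
          if mtchs.length = 1 then full_words ++ [mtchs[0]!] else full_words
      else full_words) []
  PySem.Str.join " " full_words

-- ===== PORT B =====
-- index.setdefault(w[:4], []).append(w)  ==  modify with default [] appending w
def pvBuildIndex (wordlist : List String) : PySem.Dict String (List String) :=
  wordlist.foldl (fun index w =>
    if 4 ≤ PySem.Str.len w then
      index.modify (PySem.Str.slice w none (some 4)) [] (· ++ [w])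
    else index) PySem.Dict.empty

def reconstruct_mnemonic_from_prefixes_alt (words : List String) (wordlist : List String) : String :=
  let index := pvBuildIndex wordlist
  let full_words := words.foldl (fun full_words word =>
    if PySem.Str.len word = 3 then
      let p := PySem.Str.lower word
      if wordlist.contains p then full_words ++ [p] else full_words
    else if 4 ≤ PySem.Str.len word then
      let p := PySem.Str.lower (PySem.Str.slice word none (some 4))
      let mtchs := index.getD p []
      if mtchs.length = 1 then full_words ++ [mtchs[0]!] else full_words
    else full_words) []
  PySem.Str.join " " full_words

-- ===== PRECONDITION & SPEC =====
def Spec_reconstruct_mnemonic_from_prefixes (words : List String) (wordlist : List String) (out : String) : Prop := out = reconstruct_mnemonic_from_prefixes_alt words wordlist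
instance (words : List String) (wordlist : List String) (out : String) : Decidable (Spec_reconstruct_mnemonic_from_prefixes words wordlist out) := by unfold Spec_reconstruct_mnemonic_from_prefixes; infer_instance

-- ===== CLAIM (what is proved, stated in full; the proofs are below) =====
def Claim_equal_reconstruct_mnemonic_from_prefixes : Prop := ∀ (words : List String) (wordlist : List String), Dom_reconstruct_mnemonic_from_prefixes words wordlist → Spec_reconstruct_mnemonic_from_prefixes words wordlist (reconstruct_mnemonic_from_prefixes words wordlist)


-- ===== LEMMAS AND PROOFS =====

-- w[:4] as a list of characters
lemma toList_slice4 (w : String) :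
    (PySem.Str.slice w none (some 4)).toList = w.toList.take 4 := by
  rw [PySem.Str.toList_slice, PySem.Chars.slice_eq_listSlice,
      show (4:Int) = ((4:Nat):Int) from rfl, PySem.List.slice_to_natCast]

-- pointwise fact: "length ≥ 4 and first 4 chars equal p" is exactly "startswith p" for |p| = 4
lemma startswith_take4 (w p : String) (hp : p.toList.length = 4) :
    (decide (4 ≤ PySem.Str.len w) && (PySem.Str.slice w none (some 4) == p))
      = PySem.Str.startswith w p := by
  have hsl := toList_slice4 w
  rw [PySem.Str.startswith_eq, PySem.Str.len_eq]
  by_cases h : p.toList <+: w.toList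
  · have hb : PySem.Chars.startswith w.toList p.toList = true :=
      (PySem.Chars.startswith_iff _ _).mpr h
    have htake : w.toList.take 4 = p.toList := by
      have h1 := List.prefix_iff_eq_take.mp h; rw [hp] at h1; exact h1.symm
    have hlen : 4 ≤ w.toList.length := by
      have := h.length_le; omega
    have heq : PySem.Str.slice w none (some 4) = p :=
      String.toList_inj.mp (by rw [hsl, htake])
    rw [hb, heq]
    simp
    have : w.toList.length = w.length := by simp
    omega
  · have hb : PySem.Chars.startswith w.toList p.toList = false := by
      cases hx : PySem.Chars.startswith w.toList p.toList
      · rfl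
      · exact absurd ((PySem.Chars.startswith_iff _ _).mp hx) h
    rw [hb]
    by_cases hlen : 4 ≤ w.toList.length
    · have hne : PySem.Str.slice w none (some 4) ≠ p := by
        intro he
        apply h
        rw [List.prefix_iff_eq_take, hp, ← hsl, he]
      simp [hne]
    · simp
      intro h4
      have : w.toList.length = w.length := by simp
      omega

-- The dictionary lookup for a 4-character prefix p equals A's linear filter.
lemma getD_pvBuildIndex (wordlist : List String) (p : String) (hp : p.toList.length = 4) :
    (pvBuildIndex wordlist).getD p [] =
      wordlist.filter (fun w => PySem.Str.startswith w p) := by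
  unfold pvBuildIndex
  rw [PySem.List.foldl_ite_eq_foldl_filter]
  have h2 : List.foldl
      (fun (d : PySem.Dict String (List String)) (w : String) =>
        d.modify (PySem.Str.slice w none (some 4)) [] (· ++ [w]))
      PySem.Dict.empty (wordlist.filter (fun w => decide (4 ≤ PySem.Str.len w)))
      = List.foldl (fun d q => d.modify q.1 [] (· ++ [q.2])) PySem.Dict.empty
          ((wordlist.filter (fun w => decide (4 ≤ PySem.Str.len w))).map
            (fun w => (PySem.Str.slice w none (some 4), w))) := by
    rw [List.foldl_map]
  rw [h2, PySem.Dict.getD_foldl_modify_append, PySem.Dict.getD_empty, List.nil_append,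
      List.filter_map, List.map_map, List.filter_filter]
  have : List.map ((fun (x : String × String) => x.2) ∘ fun w => (PySem.Str.slice w none (some 4), w))
      = List.map id := by rfl
  rw [this, List.map_id]
  apply List.filter_congr
  intro w _
  show ((PySem.Str.slice w none (some 4) == p) && decide (4 ≤ PySem.Str.len w)) = _
  rw [Bool.and_comm, startswith_take4 w p hp]

-- lengths through lower
lemma length_lower (s : String) : (PySem.Str.lower s).toList.length = s.toList.length := by
  rw [PySem.Str.toList_lower]; simp [PySem.Chars.lower]

lemma ne_empty_of_toList_length (s : String) (h : s.toList.length ≠ 0) : s ≠ "" := by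
  intro he; rw [he] at h; exact h rfl

theorem reconstruct_mnemonic_from_prefixes_spec : Claim_equal_reconstruct_mnemonic_from_prefixes := by
  intro words wordlist _
  unfold Spec_reconstruct_mnemonic_from_prefixes
  unfold reconstruct_mnemonic_from_prefixes reconstruct_mnemonic_from_prefixes_alt
  show PySem.Str.join " " (List.foldl _ [] words) = PySem.Str.join " " (List.foldl _ [] words)
  refine congrArg _ ?_
  apply List.foldl_ext
  intro acc word _
  rcases lt_trichotomy (PySem.Str.len word) 3 with h3 | h3 | h3
  · -- shorter than 3: A's get_prefix is none, B falls through
    have hg : get_prefix word = none := by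
      unfold get_prefix
      rw [if_neg (by omega), if_neg (by omega)]
    rw [hg]
    rw [if_neg (by omega), if_neg (by omega)]
  · -- exactly 3 letters
    have hg : get_prefix word = some (PySem.Str.lower word) := by
      unfold get_prefix; rw [if_pos h3]
    have hlen : (PySem.Str.lower word).toList.length = 3 := by
      rw [length_lower]
      have := PySem.Str.len_eq word; rw [h3] at this; omega
    simp only [hg]
    rw [if_pos (ne_empty_of_toList_length (PySem.Str.lower word) (by omega)),
        if_pos h3, if_pos h3]
  · -- 4 or more letters
    have h4 : 4 ≤ PySem.Str.len word := by omega
    have hg : get_prefix word =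
        some (PySem.Str.lower (PySem.Str.slice word none (some 4))) := by
      unfold get_prefix; rw [if_neg (by omega), if_pos h4]
    have hlen4 : 4 ≤ word.toList.length := by
      have := PySem.Str.len_eq word; omega
    have hp : (PySem.Str.lower (PySem.Str.slice word none (some 4))).toList.length = 4 := by
      rw [length_lower, toList_slice4, List.length_take]; omega
    simp only [hg]
    rw [if_pos (ne_empty_of_toList_length (PySem.Str.lower (PySem.Str.slice word none (some 4))) (by omega)),
        if_neg (show ¬PySem.Str.len word = 3 by omega), if_pos h4, getD_pvBuildIndex _ _ hp,
        if_neg (show ¬PySem.Str.len word = 3 by omega)]
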